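-- pv_equiv track=rewrite | github.com/kanikasaini/NLP-Course-Work | 3rd/Assignment3_nGram_2016047.py | get_bi_freq
-- ===== SOURCE A (Python) =====
-- def get_bi_freq(all_tokens):
-- 	bi_freq = {}
-- 	for i in range(len(all_tokens)-1):
-- 		token = all_tokens[i]
-- 		next_token = all_tokens[i+1]
-- 		if token != next_token:
-- 			if token in bi_freq:
-- 				if next_token in bi_freq[token]:
-- 					bi_freq[token][next_token] +=1
-- 				else:
-- 					bi_freq[token][next_token] = 2 #add one smoothing
-- 			else:
-- 				bi_freq[token] = {}
-- 				bi_freq[token][next_token] = 2 #add one smoothing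
--
-- 	return bi_freq
-- ===== SOURCE B (Python) =====
-- def get_bi_freq(all_tokens):
--     # Phase 1: flat count of adjacent bigrams (unequal neighbours only).
--     pairs = [p for p in zip(all_tokens, all_tokens[1:]) if p[0] != p[1]]
--     counts = {}
--     for p in pairs:
--         counts[p] = counts.get(p, 0) + 1
--     # Phase 2: reshape the flat counter into the nested dict, add-one smoothed.
--     bi_freq = {}
--     for (a, b), n in counts.items():
--         bi_freq.setdefault(a, {})[b] = n + 1
--     return bi_freq
-- ===== Notes on version B (the rewrite author's own statement) =====
-- stated objective: idiomatic
-- what changed: A builds the nested dict incrementally with three-way branching per adjacent pair; B first counts all unequal adjacent bigrams in a flat dict in one pass, then reshapes that counter into the nested add-one-smoothed dict in a separate pass.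
import Mathlib
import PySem

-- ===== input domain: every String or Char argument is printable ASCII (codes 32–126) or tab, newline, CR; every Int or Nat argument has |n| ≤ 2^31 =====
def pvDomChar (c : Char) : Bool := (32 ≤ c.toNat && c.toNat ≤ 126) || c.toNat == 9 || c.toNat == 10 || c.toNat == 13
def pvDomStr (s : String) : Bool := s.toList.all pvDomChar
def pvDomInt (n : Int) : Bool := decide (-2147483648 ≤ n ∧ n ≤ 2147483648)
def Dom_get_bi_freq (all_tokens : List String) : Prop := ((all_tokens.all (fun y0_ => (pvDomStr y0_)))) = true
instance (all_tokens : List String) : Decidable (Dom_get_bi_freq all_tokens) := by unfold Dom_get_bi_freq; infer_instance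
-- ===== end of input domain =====

-- B replaces A's incremental nested-dict bookkeeping by a two-phase decomposition (flat bigram
-- count first, reshape into the nested smoothed dict second); same cost, clearer structure.

-- ===== PORT A =====
def get_bi_freq (all_tokens : List String) : List (String × List (String × Int)) :=
  ((PySem.List.pyRange 0 ((all_tokens.length : Int) - 1) 1).foldl
      (fun bf i =>
        match PySem.List.pyGet? all_tokens i, PySem.List.pyGet? all_tokens (i + 1) with
        | some token, some next_token =>
          if token ≠ next_token then
            match bf.get? token with
            | some inner =>
              match inner.get? next_token with
              | some v => bf.insert token (inner.insert next_token (v + 1))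
              | none   => bf.insert token (inner.insert next_token 2)  -- add one smoothing
            | none => bf.insert token (PySem.Dict.empty.insert next_token 2)  -- add one smoothing
          else bf
        | _, _ => bf)
      (PySem.Dict.empty : PySem.Dict String (PySem.Dict String Int))).items.map (fun p => (p.1, p.2.items))

-- ===== PORT B =====
def get_bi_freq_alt (all_tokens : List String) : List (String × List (String × Int)) :=
  -- Phase 1: flat count of adjacent bigrams (unequal neighbours only).
  -- Phase 2: reshape the flat counter into the nested dict, add-one smoothed.
  ((((all_tokens.zip all_tokens.tail).filter (fun p => p.1 != p.2)).foldl
        (fun c p => c.insert p (c.getD p 0 + 1))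
        (PySem.Dict.empty : PySem.Dict (String × String) Int)).items.foldl
      (fun d e =>
        let d' := d.setdefault e.1.1 PySem.Dict.empty
        d'.insert e.1.1 ((d'.getD e.1.1 PySem.Dict.empty).insert e.1.2 (e.2 + 1)))
      PySem.Dict.empty).items.map (fun p => (p.1, p.2.items))

-- ===== PRECONDITION & SPEC =====
def Spec_get_bi_freq (all_tokens : List String) (out : List (String × List (String × Int))) : Prop := out = get_bi_freq_alt all_tokens
instance (all_tokens : List String) (out : List (String × List (String × Int))) : Decidable (Spec_get_bi_freq all_tokens out) := by unfold Spec_get_bi_freq; infer_instance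

-- ===== CLAIM (what is proved, stated in full; the proofs are below) =====
def Claim_equal_get_bi_freq : Prop := ∀ (all_tokens : List String), Dom_get_bi_freq all_tokens → Spec_get_bi_freq all_tokens (get_bi_freq all_tokens)

-- ===== LEMMAS AND PROOFS =====

-- the single nested-count update both programs are built from (A applies it pair by pair;
-- B's reshape applies it once per distinct pair with the accumulated count)
def pvBump (d : PySem.Dict String (PySem.Dict String Int)) (q : String × String) :
    PySem.Dict String (PySem.Dict String Int) :=
  d.insert q.1 ((d.getD q.1 PySem.Dict.empty).insert q.2
    ((d.getD q.1 PySem.Dict.empty).getD q.2 1 + 1))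

def pvStepR (d : PySem.Dict String (PySem.Dict String Int)) (e : (String × String) × Int) :
    PySem.Dict String (PySem.Dict String Int) :=
  d.insert e.1.1 ((d.getD e.1.1 PySem.Dict.empty).insert e.1.2 (e.2 + 1))

theorem pvInsComm {κ ν : Type} [BEq κ] [LawfulBEq κ] (d : PySem.Dict κ ν) (k1 k2 : κ) (v1 v2 : ν)
    (h1 : d.contains k1 = true) (hne : k1 ≠ k2) :
    (d.insert k2 v2).insert k1 v1 = (d.insert k1 v1).insert k2 v2 := by
  have h1' : (d.insert k2 v2).contains k1 = true := by
    rw [PySem.Dict.contains_insert]; simp [h1]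
  by_cases h2 : d.contains k2 = true
  · have h2' : (d.insert k1 v1).contains k2 = true := by
      rw [PySem.Dict.contains_insert]; simp [h2]
    apply PySem.Dict.ext
    rw [PySem.Dict.items_insert_of_contains _ _ h1', PySem.Dict.items_insert_of_contains _ _ h2,
        PySem.Dict.items_insert_of_contains _ _ h2', PySem.Dict.items_insert_of_contains _ _ h1,
        List.map_map, List.map_map]
    apply List.map_congr_left
    intro p _
    by_cases ha : p.1 = k1 <;> by_cases hb : p.1 = k2 <;>
      simp [Function.comp, ha, hb, hne, Ne.symm hne]
  · have h2f : d.contains k2 = false := by simpa using h2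
    have h2' : (d.insert k1 v1).contains k2 = false := by
      rw [PySem.Dict.contains_insert]; simp [h2f, Ne.symm hne]
    apply PySem.Dict.ext
    rw [PySem.Dict.items_insert_of_contains _ _ h1', PySem.Dict.items_insert_of_not_contains _ _ h2f,
        PySem.Dict.items_insert_of_not_contains _ _ h2', PySem.Dict.items_insert_of_contains _ _ h1,
        List.map_append]
    simp [Ne.symm hne]

theorem pvStepA_eq_bump (d : PySem.Dict String (PySem.Dict String Int)) (t nt : String) :
    (match d.get? t with
     | some inner =>
       match inner.get? nt with
       | some v => d.insert t (inner.insert nt (v + 1))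
       | none   => d.insert t (inner.insert nt 2)
     | none => d.insert t (PySem.Dict.empty.insert nt 2)) = pvBump d (t, nt) := by
  unfold pvBump
  cases hd : d.get? t with
  | none =>
    simp [PySem.Dict.getD_eq_get?_getD, hd]
  | some inner =>
    have hgd : d.getD t PySem.Dict.empty = inner := by
      simp [PySem.Dict.getD_eq_get?_getD, hd]
    cases hi : inner.get? nt with
    | none => simp [hgd, PySem.Dict.getD_eq_get?_getD, hi]
    | some v => simp [hgd, PySem.Dict.getD_eq_get?_getD, hi]

theorem pvStepB_eq (d : PySem.Dict String (PySem.Dict String Int)) (e : (String × String) × Int) :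
    (let d' := d.setdefault e.1.1 PySem.Dict.empty
     d'.insert e.1.1 ((d'.getD e.1.1 PySem.Dict.empty).insert e.1.2 (e.2 + 1))) = pvStepR d e := by
  show (d.setdefault e.1.1 PySem.Dict.empty).insert e.1.1
      (((d.setdefault e.1.1 PySem.Dict.empty).getD e.1.1 PySem.Dict.empty).insert e.1.2 (e.2 + 1))
      = pvStepR d e
  rw [PySem.Dict.getD_setdefault_self]
  unfold pvStepR
  by_cases h : d.contains e.1.1 = true
  · rw [PySem.Dict.setdefault_of_contains _ _ h]
  · rw [PySem.Dict.setdefault_of_not_contains _ _ (by simpa using h), PySem.Dict.insert_insert_self]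

theorem pvFoldIdx {α β : Type} (g : β → α → α → β) :
    ∀ (xs : List α) (init : β),
      (List.range (xs.length - 1)).foldl
        (fun acc i => match xs[i]?, xs[i+1]? with
          | some a, some b => g acc a b
          | _, _ => acc) init
      = (xs.zip xs.tail).foldl (fun acc p => g acc p.1 p.2) init := by
  intro xs
  induction xs with
  | nil => intro init; rfl
  | cons x rest ih =>
    intro init
    cases rest with
    | nil => rfl
    | cons y zs =>
      have hlen : (x :: y :: zs).length - 1 = ((y :: zs).length - 1) + 1 := by
        simp
      rw [hlen, List.range_succ_eq_map, List.foldl_cons, List.foldl_map]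
      have h0 : (x :: y :: zs)[0]? = some x := rfl
      have h1 : (x :: y :: zs)[1]? = some y := rfl
      rw [h0, h1]
      have hbody : ∀ (acc : β) (i : ℕ),
          (match (x :: y :: zs)[i.succ]?, (x :: y :: zs)[i.succ+1]? with
            | some a, some b => g acc a b
            | _, _ => acc)
          = (match (y :: zs)[i]?, (y :: zs)[i+1]? with
            | some a, some b => g acc a b
            | _, _ => acc) := by
        intro acc i
        rw [Nat.succ_eq_add_one, List.getElem?_cons_succ, List.getElem?_cons_succ]
      calc (List.range ((y :: zs).length - 1)).foldl
            (fun acc i => match (x :: y :: zs)[i.succ]?, (x :: y :: zs)[i.succ+1]? with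
              | some a, some b => g acc a b
              | _, _ => acc) (g init x y)
          = (List.range ((y :: zs).length - 1)).foldl
            (fun acc i => match (y :: zs)[i]?, (y :: zs)[i+1]? with
              | some a, some b => g acc a b
              | _, _ => acc) (g init x y) := by
            apply PySem.List.foldl_congr_mem
            intro acc i _
            exact hbody acc i
        _ = ((y :: zs).zip zs).foldl (fun acc p => g acc p.1 p.2) (g init x y) := ih _
        _ = ((x :: y :: zs).zip (y :: zs)).foldl (fun acc p => g acc p.1 p.2) init := by
            rw [List.zip_cons_cons, List.foldl_cons]

theorem pvFoldIdxInt {α β : Type} (g : β → α → α → β) (xs : List α) (init : β) :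
    (PySem.List.pyRange 0 ((xs.length : Int) - 1) 1).foldl
      (fun acc i => match PySem.List.pyGet? xs i, PySem.List.pyGet? xs (i + 1) with
        | some a, some b => g acc a b
        | _, _ => acc) init
    = (xs.zip xs.tail).foldl (fun acc p => g acc p.1 p.2) init := by
  cases xs with
  | nil => rfl
  | cons x rest =>
    have hcast : ((x :: rest).length : Int) - 1 = ((x :: rest).length - 1 : ℕ) := by
      simp
    rw [hcast, PySem.List.pyRange_zero_natCast, List.foldl_map]
    rw [← pvFoldIdx g (x :: rest) init]
    apply PySem.List.foldl_congr_mem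
    intro acc k _
    have : ((k : Int) + 1) = ((k + 1 : ℕ) : Int) := by push_cast; ring
    rw [PySem.List.pyGet?_natCast, this, PySem.List.pyGet?_natCast]

theorem pvContainsInner :
    ∀ (ps : List (String × String)) (d : PySem.Dict String (PySem.Dict String Int)) (a b : String),
      (((ps.foldl pvBump d).getD a PySem.Dict.empty).contains b) = true →
      (a, b) ∈ ps ∨ ((d.getD a PySem.Dict.empty).contains b) = true := by
  intro ps
  induction ps with
  | nil => intro d a b h; exact Or.inr h
  | cons p ps ih =>
    intro d a b h
    rcases ih (pvBump d p) a b h with hmem | hd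
    · exact Or.inl (List.mem_cons_of_mem _ hmem)
    · by_cases ha : a = p.1
      · subst ha
        unfold pvBump at hd
        rw [PySem.Dict.getD_insert_self, PySem.Dict.contains_insert] at hd
        rcases Bool.or_eq_true_iff.mp hd with hb | hold
        · left
          have hpb : (p.1, b) = p := Prod.ext rfl (eq_of_beq hb)
          rw [hpb]
          exact List.mem_cons_self
        · exact Or.inr hold
      · unfold pvBump at hd
        rw [PySem.Dict.getD_insert_of_ne _ _ _ ha] at hd
        exact Or.inr hd

theorem pvBumpContains (d : PySem.Dict String (PySem.Dict String Int)) (q : String × String)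
    (h : ((d.getD q.1 PySem.Dict.empty).contains q.2) = true) : d.contains q.1 = true := by
  by_contra hc
  rw [PySem.Dict.getD_of_not_contains _ _ (by simpa using hc), PySem.Dict.contains_empty] at h
  exact Bool.false_ne_true h

theorem pvPres (d : PySem.Dict String (PySem.Dict String Int)) (e : (String × String) × Int)
    (q : String × String)
    (h : ((d.getD q.1 PySem.Dict.empty).contains q.2) = true) :
    (((pvStepR d e).getD q.1 PySem.Dict.empty).contains q.2) = true := by
  unfold pvStepR
  by_cases ha : q.1 = e.1.1
  · rw [← ha, PySem.Dict.getD_insert_self, PySem.Dict.contains_insert, h, Bool.or_true]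
  · rw [PySem.Dict.getD_insert_of_ne _ _ _ ha]; exact h

theorem pvComm1 (d : PySem.Dict String (PySem.Dict String Int)) (e : (String × String) × Int)
    (q : String × String)
    (h : ((d.getD q.1 PySem.Dict.empty).contains q.2) = true) (hne : e.1 ≠ q) :
    pvBump (pvStepR d e) q = pvStepR (pvBump d q) e := by
  have hda := pvBumpContains d q h
  obtain ⟨⟨c, v⟩, n⟩ := e
  obtain ⟨a, b⟩ := q
  simp only [pvBump, pvStepR] at *
  by_cases hca : c = a
  · subst hca
    have hvb : b ≠ v := by
      intro hbv; exact hne (by simp [hbv])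
    rw [PySem.Dict.getD_insert_self, PySem.Dict.getD_insert_self,
        PySem.Dict.getD_insert_of_ne _ _ _ hvb,
        PySem.Dict.insert_insert_self, PySem.Dict.insert_insert_self]
    rw [pvInsComm _ b v _ _ h hvb]
  · have hac : a ≠ c := Ne.symm hca
    rw [PySem.Dict.getD_insert_of_ne _ _ _ hac, PySem.Dict.getD_insert_of_ne _ _ _ hca]
    rw [pvInsComm _ a c _ _ hda hac]

theorem pvCommFold :
    ∀ (L : List ((String × String) × Int)) (d : PySem.Dict String (PySem.Dict String Int))
      (q : String × String),
      ((d.getD q.1 PySem.Dict.empty).contains q.2) = true → q ∉ L.map Prod.fst →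
      pvBump (L.foldl pvStepR d) q = L.foldl pvStepR (pvBump d q) := by
  intro L
  induction L with
  | nil => intro d q _ _; rfl
  | cons e L ih =>
    intro d q h hq
    have hne : e.1 ≠ q := by
      intro hh; exact hq (by simp [hh])
    have hq' : q ∉ L.map Prod.fst := by
      intro hh; exact hq (by simp [hh])
    rw [List.foldl_cons, List.foldl_cons, ih _ q (pvPres d e q h) hq', pvComm1 d e q h hne]

theorem pvBumpStepR (d : PySem.Dict String (PySem.Dict String Int)) (q : String × String) (n : Int) :
    pvBump (pvStepR d (q, n)) q = pvStepR d (q, n + 1) := by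
  obtain ⟨a, b⟩ := q
  simp only [pvBump, pvStepR]
  rw [PySem.Dict.getD_insert_self, PySem.Dict.getD_insert_self,
      PySem.Dict.insert_insert_self, PySem.Dict.insert_insert_self]

theorem pvK :
    ∀ (L : List ((String × String) × Int)) (d : PySem.Dict String (PySem.Dict String Int))
      (q : String × String),
      (L.map Prod.fst).Nodup → q ∈ L.map Prod.fst →
      (L.map (fun e => if e.1 = q then (e.1, e.2 + 1) else e)).foldl pvStepR d
        = pvBump (L.foldl pvStepR d) q := by
  intro L
  induction L with
  | nil => intro d q _ hq; simp at hq
  | cons e L ih =>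
    intro d q hnd hq
    rw [List.map_cons] at hnd hq
    have hnd' : (L.map Prod.fst).Nodup := (List.nodup_cons.mp hnd).2
    by_cases he : e.1 = q
    · have hqL : q ∉ L.map Prod.fst := by
        have := (List.nodup_cons.mp hnd).1
        rwa [he] at this
      have hLfix : L.map (fun e => if e.1 = q then (e.1, e.2 + 1) else e) = L := by
        apply List.map_congr_left ?_ |>.trans (List.map_id L)
        intro x hx
        have : x.1 ≠ q := by
          intro hh; exact hqL (hh ▸ List.mem_map_of_mem hx)
        simp [this]
      obtain ⟨p, n⟩ := e
      simp only at he
      subst he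
      rw [List.map_cons, if_pos rfl, List.foldl_cons, List.foldl_cons, hLfix]
      rw [pvCommFold L _ p (by
            simp only [pvStepR, PySem.Dict.getD_insert_self, PySem.Dict.contains_insert]
            simp) hqL]
      rw [pvBumpStepR]
    · rw [List.map_cons, if_neg he, List.foldl_cons, List.foldl_cons]
      apply ih
      · exact hnd'
      · rcases List.mem_cons.mp hq with h1 | h2
        · exact absurd h1.symm he
        · exact h2

theorem pvM :
    ∀ (ps : List (String × String)),
      ps.foldl pvBump PySem.Dict.empty
        = ((PySem.Set.ofList ps).map (fun k => (k, (ps.count k : Int)))).foldl pvStepR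
            PySem.Dict.empty := by
  intro ps
  induction ps using List.reverseRecOn with
  | nil => rfl
  | append_singleton ps q ih =>
    rw [List.foldl_append, List.foldl_cons, List.foldl_nil]
    have hofl : PySem.Set.ofList (ps ++ [q]) = PySem.Set.add (PySem.Set.ofList ps) q := by
      rw [PySem.Set.ofList_eq_foldl, PySem.Set.ofList_eq_foldl, List.foldl_append,
          List.foldl_cons, List.foldl_nil]
    by_cases hq : q ∈ ps
    · have hcts : PySem.Set.contains (PySem.Set.ofList ps) q = true := by
        simpa [PySem.Set.contains, PySem.Set.mem_ofList] using hq
      have hset : PySem.Set.ofList (ps ++ [q]) = PySem.Set.ofList ps := by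
        rw [hofl]; unfold PySem.Set.add; rw [hcts]; simp
      rw [hset]
      have hmap : (PySem.Set.ofList ps).map (fun k => (k, ((ps ++ [q]).count k : Int)))
          = ((PySem.Set.ofList ps).map (fun k => (k, (ps.count k : Int)))).map
              (fun e => if e.1 = q then (e.1, e.2 + 1) else e) := by
        rw [List.map_map]
        apply List.map_congr_left
        intro k hk
        by_cases hkq : k = q
        · subst hkq
          simp [List.count_append, Function.comp]
        · simp [Function.comp, hkq, List.count_append, List.count_singleton,
                (by simpa using Ne.symm hkq : (q == k) = false)]
      rw [hmap, pvK _ _ q ?nodup ?mem, ← ih]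
      case nodup =>
        rw [List.map_map]
        have : (Prod.fst ∘ fun k => (k, (ps.count k : Int))) = id := rfl
        rw [this, List.map_id]
        exact PySem.Set.nodup_ofList ps
      case mem =>
        rw [List.map_map]
        have : (Prod.fst ∘ fun k => (k, (ps.count k : Int))) = id := rfl
        rw [this, List.map_id]
        exact (PySem.Set.mem_ofList ps q).mpr hq
    · have hcts : PySem.Set.contains (PySem.Set.ofList ps) q = false := by
        simpa [PySem.Set.contains, PySem.Set.mem_ofList] using hq
      have hset : PySem.Set.ofList (ps ++ [q]) = PySem.Set.ofList ps ++ [q] := by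
        rw [hofl]; unfold PySem.Set.add; rw [hcts]; simp
      rw [hset, List.map_append]
      have hmap : (PySem.Set.ofList ps).map (fun k => (k, ((ps ++ [q]).count k : Int)))
          = (PySem.Set.ofList ps).map (fun k => (k, (ps.count k : Int))) := by
        apply List.map_congr_left
        intro k hk
        have hkq : k ≠ q := by
          intro hh; exact hq (hh ▸ (PySem.Set.mem_ofList ps k).mp hk)
        simp [List.count_append, List.count_singleton,
              (by simpa using Ne.symm hkq : (q == k) = false)]
      have hcq : ((ps ++ [q]).count q : Int) = 1 := by
        rw [List.count_append, List.count_singleton]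
        simp [List.count_eq_zero.mpr hq]
      rw [hmap, List.foldl_append, List.map_cons, List.map_nil, List.foldl_cons, List.foldl_nil, ← ih, hcq]
      -- bump on a fresh pair is stepR with count 1
      have hfree : (((ps.foldl pvBump PySem.Dict.empty).getD q.1 PySem.Dict.empty).contains q.2)
          = false := by
        by_contra hc
        have := pvContainsInner ps PySem.Dict.empty q.1 q.2 (by simpa using hc)
        rcases this with hmem | habs
        · exact hq (by simpa using hmem)
        · rw [PySem.Dict.getD_empty, PySem.Dict.contains_empty] at habs
          exact Bool.false_ne_true habs
      obtain ⟨a, b⟩ := q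
      simp only [pvBump, pvStepR]
      rw [PySem.Dict.getD_of_not_contains _ _ hfree]

theorem pvAeq (xs : List String) :
    (PySem.List.pyRange 0 ((xs.length : Int) - 1) 1).foldl
      (fun bf i =>
        match PySem.List.pyGet? xs i, PySem.List.pyGet? xs (i + 1) with
        | some token, some next_token =>
          if token ≠ next_token then
            match bf.get? token with
            | some inner =>
              match inner.get? next_token with
              | some v => bf.insert token (inner.insert next_token (v + 1))
              | none   => bf.insert token (inner.insert next_token 2)
            | none => bf.insert token (PySem.Dict.empty.insert next_token 2)
          else bf
        | _, _ => bf)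
      (PySem.Dict.empty : PySem.Dict String (PySem.Dict String Int))
      = ((xs.zip xs.tail).filter (fun p => p.1 != p.2)).foldl pvBump PySem.Dict.empty := by
  have h1 := pvFoldIdxInt
    (g := fun (acc : PySem.Dict String (PySem.Dict String Int)) (t nt : String) =>
      if t ≠ nt then
        (match acc.get? t with
         | some inner =>
           match inner.get? nt with
           | some v => acc.insert t (inner.insert nt (v + 1))
           | none   => acc.insert t (inner.insert nt 2)
         | none => acc.insert t (PySem.Dict.empty.insert nt 2))
      else acc) xs PySem.Dict.empty
  have h2 : (xs.zip xs.tail).foldl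
      (fun (acc : PySem.Dict String (PySem.Dict String Int)) p =>
        if p.1 ≠ p.2 then
          (match acc.get? p.1 with
           | some inner =>
             match inner.get? p.2 with
             | some v => acc.insert p.1 (inner.insert p.2 (v + 1))
             | none   => acc.insert p.1 (inner.insert p.2 2)
           | none => acc.insert p.1 (PySem.Dict.empty.insert p.2 2))
        else acc) PySem.Dict.empty
      = (xs.zip xs.tail).foldl
        (fun acc p => if p.1 ≠ p.2 then pvBump acc p else acc) PySem.Dict.empty := by
    apply PySem.List.foldl_congr_mem
    intro acc p _
    obtain ⟨a, b⟩ := p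
    by_cases hab : a ≠ b
    · rw [if_pos hab, if_pos hab, pvStepA_eq_bump]
    · rw [if_neg hab, if_neg hab]
  have h3 := PySem.List.foldl_ite_eq_foldl_filter
    (p := fun pr : String × String => pr.1 ≠ pr.2) pvBump (xs.zip xs.tail) PySem.Dict.empty
  have h4 : (xs.zip xs.tail).filter (fun x => decide (x.1 ≠ x.2))
      = (xs.zip xs.tail).filter (fun p => p.1 != p.2) := by
    apply List.filter_congr
    intro x _
    cases h : x.1 == x.2 <;> simp_all
  refine Eq.trans (Eq.trans ?_ h1) (h2.trans (h3.trans (by rw [h4])))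
  apply PySem.List.foldl_congr_mem
  intro acc i _
  cases PySem.List.pyGet? xs i <;> cases PySem.List.pyGet? xs (i + 1) <;> rfl

theorem pvMain (xs : List String) : get_bi_freq xs = get_bi_freq_alt xs := by
  unfold get_bi_freq get_bi_freq_alt
  rw [pvAeq xs]
  have hcnt : ((xs.zip xs.tail).filter (fun p => p.1 != p.2)).foldl
      (fun c p => c.insert p (c.getD p 0 + 1)) PySem.Dict.empty
      = PySem.Dict.counter ((xs.zip xs.tail).filter (fun p => p.1 != p.2)) :=
    PySem.Dict.foldl_insert_getD_add_one_eq_counter _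
  rw [hcnt, PySem.Dict.items_counter]
  have hB : ∀ (L : List ((String × String) × Int)),
      L.foldl (fun d e =>
        let d' := d.setdefault e.1.1 PySem.Dict.empty
        d'.insert e.1.1 ((d'.getD e.1.1 PySem.Dict.empty).insert e.1.2 (e.2 + 1)))
        PySem.Dict.empty
      = L.foldl pvStepR PySem.Dict.empty := by
    intro L
    apply PySem.List.foldl_congr_mem
    intro acc e _
    exact pvStepB_eq acc e
  rw [hB]
  rw [pvM]

-- ===== VERDICT (by name: the statement is the Claim_ definition above) =====
theorem get_bi_freq_spec : Claim_equal_get_bi_freq := by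
  intro all_tokens _
  unfold Spec_get_bi_freq
  exact pvMain all_tokens
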